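-- pv_equiv track=rewrite | github.com/sangamek/SQLGenieAgent | app.py | parse_schema
-- ===== SOURCE A (Python) =====
-- def parse_schema(schema):
--     """Parse schema text into a structured format"""
--     tables = {}
--     current_table = None
--     for line in schema.split('\n'):
--         line = line.strip()
--         if not line:  # Skip empty lines
--             continue
--         if line.startswith('Table:'):
--             current_table = line.replace('Table:', '').strip()
--             tables[current_table] = []
--         elif line.startswith('-') and current_table:
--             parts = line.replace('-', '').split('(')
--             col = parts[0].strip()
--             col_type = parts[1].replace(')', '').strip() if len(parts) > 1 else ''
--             tables[current_table].append({
--                 'name': col,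
--                 'type': col_type,
--                 'is_key': 'primary key' in col_type.lower() or 'foreign key' in col_type.lower()
--             })
--     return tables
-- ===== SOURCE B (Python) =====
-- def _parse_column(line):
--     parts = line.replace('-', '').split('(')
--     col_type = parts[1].replace(')', '').strip() if len(parts) > 1 else ''
--     return {
--         'name': parts[0].strip(),
--         'type': col_type,
--         'is_key': 'primary key' in col_type.lower() or 'foreign key' in col_type.lower(),
--     }
--
--
-- def parse_schema(schema):
--     """Parse schema text into a structured format"""
--     # Phase 1: partition the lines into ordered (table_name, column_lines) segments.
--     # A column line counts only under the latest table with a non-empty name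
--     # (Python's truthiness check on the current table name).
--     segments = []
--     for raw in schema.split('\n'):
--         line = raw.strip()
--         if line.startswith('Table:'):
--             segments.append((line.replace('Table:', '').strip(), []))
--         elif line.startswith('-') and segments and segments[-1][0]:
--             segments[-1][1].append(line)
--     # Phase 2: build the dict; a later duplicate table name overwrites the
--     # earlier one's list (keeping its first-insertion position).
--     tables = {}
--     for name, col_lines in segments:
--         tables[name] = [_parse_column(l) for l in col_lines]
--     return tables
-- ===== Notes on version B (the rewrite author's own statement) =====
-- stated objective: alternative
-- what changed: Replaced A's single stateful loop (mutating the result dict and a current_table variable per line) with a two-phase decomposition: first partition the lines into ordered (table_name, column_lines) segments, then build the dict by assigning each segment's parsed columns, so a later duplicate table name overwrites with its own fresh list; per-column parsing is unchanged.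
import Mathlib
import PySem

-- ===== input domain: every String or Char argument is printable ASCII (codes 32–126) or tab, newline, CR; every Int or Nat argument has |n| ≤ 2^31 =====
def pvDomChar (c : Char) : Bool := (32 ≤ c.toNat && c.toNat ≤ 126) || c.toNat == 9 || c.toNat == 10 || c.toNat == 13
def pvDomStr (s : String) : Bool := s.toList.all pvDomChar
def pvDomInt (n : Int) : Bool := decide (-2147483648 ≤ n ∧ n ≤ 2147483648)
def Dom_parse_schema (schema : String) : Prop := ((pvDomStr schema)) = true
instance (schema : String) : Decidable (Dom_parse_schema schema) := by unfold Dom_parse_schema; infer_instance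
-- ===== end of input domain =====

-- B re-decomposes A's single stateful loop into two phases (partition lines into
-- (table, column-lines) segments, then build the dict); same cost, objective: alternative.

-- ===== PORT A =====
-- shared per-column parsing (identical in both Pythons; Python's bool values
-- True/False in the str-valued column dict are rendered as "True"/"False")
def pvColDict (line : String) : List (String × String) :=
  let parts := (PySem.Str.split? (PySem.Str.replace line "-" "") "(").getD []
  let col := PySem.Str.strip (parts.getD 0 "")
  let col_type :=
    if parts.length > 1 then PySem.Str.strip (PySem.Str.replace (parts.getD 1 "") ")" "") else ""
  [("name", col), ("type", col_type),
   ("is_key",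
    if PySem.Str.isIn "primary key" (PySem.Str.lower col_type)
       || PySem.Str.isIn "foreign key" (PySem.Str.lower col_type)
    then "True" else "False")]

-- one iteration of A's loop: state = (tables, current_table);
-- 'current_table' truthiness = some name with name ≠ ""
def pvStepA (st : PySem.Dict String (List (List (String × String))) × Option String)
    (raw : String) : PySem.Dict String (List (List (String × String))) × Option String :=
  let line := PySem.Str.strip raw
  if line = "" then st
  else if PySem.Str.startswith line "Table:" then
    let name := PySem.Str.strip (PySem.Str.replace line "Table:" "")
    (st.1.insert name [], some name)
  else if PySem.Str.startswith line "-" && (st.2.getD "") != "" then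
    (st.1.modify (st.2.getD "") [] (fun cols => cols ++ [pvColDict line]), st.2)
  else st

def parse_schema (schema : String) : List (String × List (List (String × String))) :=
  ((((PySem.Str.split? schema "\n").getD []).foldl pvStepA (PySem.Dict.empty, none))).1.items

-- ===== PORT B =====
-- phase 1: one iteration of the segmenting loop (appends like the Python list does)
def pvStepB (segs : List (String × List String)) (raw : String) : List (String × List String) :=
  let line := PySem.Str.strip raw
  if PySem.Str.startswith line "Table:" then
    segs ++ [(PySem.Str.strip (PySem.Str.replace line "Table:" ""), [])]
  else if PySem.Str.startswith line "-" then
    match segs.getLast? with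
    | some (n, cols) => if n != "" then segs.dropLast ++ [(n, cols ++ [line])] else segs
    | none => segs
  else segs

-- phase 2: tables[name] = [parse_column(l) for l in col_lines], in segment order
def pvBuild (segs : List (String × List String)) :
    PySem.Dict String (List (List (String × String))) :=
  segs.foldl (fun d seg => d.insert seg.1 (seg.2.map pvColDict)) PySem.Dict.empty

def parse_schema_alt (schema : String) : List (String × List (List (String × String))) :=
  (pvBuild (((PySem.Str.split? schema "\n").getD []).foldl pvStepB [])).items

-- ===== PRECONDITION & SPEC =====
def Spec_parse_schema (schema : String) (out : List (String × List (List (String × String)))) : Prop := out = parse_schema_alt schema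
instance (schema : String) (out : List (String × List (List (String × String)))) : Decidable (Spec_parse_schema schema out) := by unfold Spec_parse_schema; infer_instance

-- ===== CLAIM (what is proved, stated in full; the proofs are below) =====
def Claim_equal_parse_schema : Prop := ∀ (schema : String), Dom_parse_schema schema → Spec_parse_schema schema (parse_schema schema)

-- ===== LEMMAS AND PROOFS =====

-- the relation the two loops preserve: A's dict is the dict built from B's segments,
-- and A's current_table is the name of B's last segment
def pvInv (st : PySem.Dict String (List (List (String × String))) × Option String)
    (segs : List (String × List String)) : Prop :=
  st.1 = pvBuild segs ∧ st.2 = (segs.getLast? ).map Prod.fst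

theorem pvBuild_append_singleton (segs : List (String × List String)) (n : String)
    (cs : List String) :
    pvBuild (segs ++ [(n, cs)]) = (pvBuild segs).insert n (cs.map pvColDict) := by
  simp [pvBuild]

theorem pvStep_inv (st : PySem.Dict String (List (List (String × String))) × Option String)
    (segs : List (String × List String)) (raw : String) (h : pvInv st segs) :
    pvInv (pvStepA st raw) (pvStepB segs raw) := by
  obtain ⟨h1, h2⟩ := h
  simp only [pvStepA, pvStepB]
  by_cases he : PySem.Str.strip raw = ""
  · -- empty line: A skips it; B's two startswith tests fail on ""
    rw [if_pos he, he]
    have h3 : PySem.Str.startswith "" "Table:" = false := by decide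
    have h4 : PySem.Str.startswith "" "-" = false := by decide
    rw [h3, h4]
    simp only [Bool.false_eq_true, if_false]
    exact ⟨h1, h2⟩
  · rw [if_neg he]
    by_cases ht : PySem.Str.startswith (PySem.Str.strip raw) "Table:" = true
    · -- Table line: A inserts name ↦ [], B appends a fresh segment
      rw [if_pos ht, if_pos ht]
      refine ⟨?_, ?_⟩
      · rw [pvBuild_append_singleton, h1]; rfl
      · simp
    · rw [if_neg ht, if_neg ht]
      by_cases hd : PySem.Str.startswith (PySem.Str.strip raw) "-" = true
      · rw [if_pos hd]
        cases hl : segs.getLast? with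
        | none =>
          -- no table yet: A's current_table is none, guard fails; B has no segment
          have hc : st.2 = none := by rw [h2, hl]; rfl
          rw [hc]
          simp only [hd, Option.getD_none, bne_self_eq_false, Bool.and_false,
            Bool.false_eq_true, if_false]
          exact ⟨h1, h2⟩
        | some p =>
          obtain ⟨n, cols⟩ := p
          have hc : st.2 = some n := by rw [h2, hl]; rfl
          rw [hc]
          by_cases hn : n = ""
          · -- empty table name: falsy in A, skipped by B too
            subst hn
            simp only [hd, Option.getD_some, bne_self_eq_false, Bool.and_false,
              Bool.false_eq_true, if_false]
            exact ⟨h1, h2⟩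
          · have hb : (n != "") = true := by simpa using hn
            have hsegs : segs = segs.dropLast ++ [(n, cols)] :=
              (List.dropLast_append_getLast? (a := (n, cols)) hl).symm
            simp only [hd, Option.getD_some, hb, Bool.and_self, if_true]
            refine ⟨?_, ?_⟩
            · rw [h1, pvBuild_append_singleton]
              conv_lhs => rw [hsegs, pvBuild_append_singleton]
              simp only [PySem.Dict.modify, PySem.Dict.getD_insert_self,
                PySem.Dict.insert_insert_self, List.map_append, List.map]
            · simp
      · -- neither marker: both states unchanged
        have hd' : PySem.Str.startswith (PySem.Str.strip raw) "-" = false :=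
          eq_false_of_ne_true hd
        rw [hd']
        simp only [Bool.false_and, Bool.false_eq_true, if_false]
        exact ⟨h1, h2⟩

theorem pvFold_inv (lines : List String)
    (st : PySem.Dict String (List (List (String × String))) × Option String)
    (segs : List (String × List String)) (h : pvInv st segs) :
    pvInv (lines.foldl pvStepA st) (lines.foldl pvStepB segs) := by
  induction lines generalizing st segs with
  | nil => simpa using h
  | cons l ls ih => exact ih _ _ (pvStep_inv _ _ _ h)

-- ===== VERDICT (by name: the statement is the Claim_ definition above) =====
theorem parse_schema_spec : Claim_equal_parse_schema := by
  intro schema _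
  unfold Spec_parse_schema parse_schema parse_schema_alt
  have h := pvFold_inv ((PySem.Str.split? schema "\n").getD []) (PySem.Dict.empty, none) []
    ⟨by simp [pvBuild], rfl⟩
  rw [h.1]
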